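-- pv_equiv track=rewrite | github.com/mariemmanue/EmbeddingsBias | BBQ/BBQ_Experiments.py | first_letter
-- ===== SOURCE A (Python) =====
-- from typing import List, Dict, Any, Optional, Tuple
--
-- def first_letter(text: str) -> Optional[str]:
--     if not text:
--         return None
--     t = text.strip().upper()
--     for ch in t:
--         if ch in ("A", "B", "C"):
--             return ch
--     return None
-- ===== SOURCE B (Python) =====
-- from typing import Optional
--
-- def first_letter(text: str) -> Optional[str]:
--     if not text:
--         return None
--     t = text.strip().upper()
--     idxs = [i for i in (t.find(c) for c in "ABC") if i != -1]
--     if not idxs: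
--         return None
--     return t[min(idxs)]
-- ===== Notes on version B (the rewrite author's own statement) =====
-- stated objective: alternative
-- what changed: Replaces the single forward scan testing membership in ('A','B','C') with three independent str.find searches whose non-(-1) results are combined by min, then indexing back into the string.
import Mathlib
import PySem

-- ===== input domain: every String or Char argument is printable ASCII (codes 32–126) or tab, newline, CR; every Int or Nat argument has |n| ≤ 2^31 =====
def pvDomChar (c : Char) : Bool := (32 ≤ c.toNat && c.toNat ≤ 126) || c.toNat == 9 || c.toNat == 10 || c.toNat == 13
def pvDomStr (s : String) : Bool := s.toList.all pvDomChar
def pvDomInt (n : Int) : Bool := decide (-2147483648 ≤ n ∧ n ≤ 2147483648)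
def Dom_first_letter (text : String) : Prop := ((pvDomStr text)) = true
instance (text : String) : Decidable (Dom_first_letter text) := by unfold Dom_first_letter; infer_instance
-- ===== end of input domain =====

-- B replaces A's single membership-testing scan by three str.find searches combined with min; alternative decomposition, return value proved equal on all inputs.

-- ===== PORT A =====
def faScan : List Char → Option String
  | [] => none
  | c :: rest => if c = 'A' ∨ c = 'B' ∨ c = 'C' then some (String.mk [c]) else faScan rest

def first_letter (text : String) : Option String :=
  if text.toList.isEmpty then none
  else faScan (PySem.Chars.upper (PySem.Chars.strip text.toList))

-- ===== PORT B =====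
def first_letter_alt (text : String) : Option String :=
  if text.toList.isEmpty then none
  else
    let t := PySem.Chars.upper (PySem.Chars.strip text.toList)
    let idxs := ((['A', 'B', 'C'] : List Char).map (fun c => PySem.Chars.find t [c])).filter (fun i => i != -1)
    match PySem.List.min? idxs (fun x => x) with
    | none => none
    | some m => (PySem.List.pyGet? t m).map (fun c => String.mk [c])

-- ===== PRECONDITION & SPEC =====
def Spec_first_letter (text : String) (out : Option String) : Prop := out = first_letter_alt text
instance (text : String) (out : Option String) : Decidable (Spec_first_letter text out) := by unfold Spec_first_letter; infer_instance

-- ===== CLAIM (what is proved, stated in full; the proofs are below) =====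
def Claim_equal_first_letter : Prop := ∀ (text : String), Dom_first_letter text → Spec_first_letter text (first_letter text)

-- ===== LEMMAS AND PROOFS =====

def pvP (c : Char) : Bool := decide (c = 'A' ∨ c = 'B' ∨ c = 'C')

theorem scan_eq_find? (t : List Char) :
    faScan t = (t.find? pvP).map (fun c => String.mk [c]) := by
  induction t with
  | nil => rfl
  | cons c rest ih =>
    by_cases hc : c = 'A' ∨ c = 'B' ∨ c = 'C'
    · simp [faScan, hc, pvP]
    · simp [faScan, hc, pvP, ih]

theorem singleton_prefix_iff_head? (c : Char) (l : List Char) : [c] <+: l ↔ l.head? = some c := by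
  cases l with
  | nil => simp
  | cons a as =>
    constructor
    · intro h
      obtain ⟨s, hs⟩ := h
      simp at hs
      simp [hs.1]
    · intro h
      simp at h
      subst h
      exact ⟨as, rfl⟩

theorem core_eq (t : List Char) :
    faScan t =
      (match PySem.List.min?
          (((['A', 'B', 'C'] : List Char).map (fun c => PySem.Chars.find t [c])).filter (fun i => i != -1))
          (fun x => x) with
       | none => none
       | some m => (PySem.List.pyGet? t m).map (fun c => String.mk [c])) := by
  rw [scan_eq_find?]
  cases h : t.find? pvP with
  | none =>
    have hall : ∀ c ∈ t, ¬ pvP c = true := List.find?_eq_none.mp h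
    have hnil : (((['A', 'B', 'C'] : List Char).map (fun c => PySem.Chars.find t [c])).filter
        (fun i => i != -1)) = [] := by
      rw [List.filter_eq_nil_iff]
      intro i hi
      simp only [List.mem_map] at hi
      obtain ⟨c, hc, rfl⟩ := hi
      have hfi : PySem.Chars.find t [c] = -1 := by
        apply (PySem.Chars.find_eq_neg_one_iff t [c]).mpr
        intro hinf
        have hmem : c ∈ t := (List.singleton_infix_iff c t).mp hinf
        have := hall c hmem
        fin_cases hc <;> simp [pvP] at this
      simp [hfi]
    rw [hnil]
    simp [PySem.List.min?]
  | some c0 =>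
    obtain ⟨hp, j, hj, hget, hmin⟩ := List.find?_eq_some_iff_getElem.mp h
    have hc0mem : c0 ∈ (['A', 'B', 'C'] : List Char) := by
      simp only [pvP, decide_eq_true_eq] at hp
      rcases hp with h'|h'|h' <;> simp [h']
    have hc0t : c0 ∈ t := hget ▸ t.getElem_mem hj
    have hf0nn : 0 ≤ PySem.Chars.find t [c0] :=
      (PySem.Chars.find_nonneg_iff t [c0]).mpr ((List.singleton_infix_iff c0 t).mpr hc0t)
    have hspec0 := PySem.Chars.find_spec hf0nn
    have hprefj : [c0] <+: t.drop j := by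
      rw [singleton_prefix_iff_head?, List.head?_drop]
      simp [List.getElem?_eq_getElem hj, hget]
    have hf0le : PySem.Chars.find t [c0] ≤ (j : Int) := by
      by_contra hlt
      push Not at hlt
      exact hspec0.2 j (by omega) hprefj
    have hlb : ∀ m ∈ (((['A', 'B', 'C'] : List Char).map (fun c => PySem.Chars.find t [c])).filter
        (fun i => i != -1)), (j : Int) ≤ m := by
      intro m hm
      simp only [List.mem_filter, List.mem_map] at hm
      obtain ⟨⟨c, hcmem, rfl⟩, hne⟩ := hm
      have hnn : 0 ≤ PySem.Chars.find t [c] := by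
        have := PySem.Chars.neg_one_le_find t [c]
        simp only [bne_iff_ne, ne_eq] at hne
        omega
      obtain ⟨hpref, _⟩ := PySem.Chars.find_spec hnn
      rw [singleton_prefix_iff_head?, List.head?_drop] at hpref
      have hlen : (PySem.Chars.find t [c]).toNat < t.length :=
        (List.getElem?_eq_some_iff.mp hpref).1
      have hgetc : t[(PySem.Chars.find t [c]).toNat]'hlen = c := by
        have := List.getElem?_eq_getElem hlen
        rw [this] at hpref
        exact Option.some.inj hpref
      by_contra hlt
      push Not at hlt
      have hk : (PySem.Chars.find t [c]).toNat < j := by omega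
      have hfalse := hmin _ hk
      rw [hgetc] at hfalse
      fin_cases hcmem <;> simp [pvP] at hfalse
    have hf0mem : PySem.Chars.find t [c0] ∈
        (((['A', 'B', 'C'] : List Char).map (fun c => PySem.Chars.find t [c])).filter
          (fun i => i != -1)) := by
      simp only [List.mem_filter, List.mem_map]
      refine ⟨⟨c0, hc0mem, rfl⟩, by simp only [bne_iff_ne, ne_eq]; omega⟩
    cases hmq : PySem.List.min?
        (((['A', 'B', 'C'] : List Char).map (fun c => PySem.Chars.find t [c])).filter
          (fun i => i != -1)) (fun x => x) with
    | none =>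
      rw [(PySem.List.min?_eq_none_iff _ _).mp hmq] at hf0mem
      exact absurd hf0mem (List.not_mem_nil)
    | some m =>
      have hjm : (j : Int) ≤ m := hlb m (PySem.List.min?_mem hmq)
      have hmle : m ≤ PySem.Chars.find t [c0] := PySem.List.min?_isMin hmq _ hf0mem
      have hmj : m = (j : Int) := le_antisymm (le_trans hmle hf0le) hjm
      subst hmj
      simp [pysem, List.getElem?_eq_getElem hj, hget]

-- ===== VERDICT (by name: the statement is the Claim_ definition above) =====
theorem first_letter_spec : Claim_equal_first_letter := by
  intro text _
  unfold Spec_first_letter first_letter first_letter_alt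
  by_cases h : text.toList.isEmpty
  · simp [h]
  · simp only [h]
    exact core_eq _
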